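-- pv_equiv track=rewrite | github.com/eodudsla10/Algorithm | 김성수/LV1/핸드폰 번호 가리기.py | solution
-- ===== SOURCE A (Python) =====
-- def solution(phone_number):
--     c = 1
--     result =''
--     for  i in phone_number[-1::-1]:
--         if c>4 :
--             result +='*'
--         else:
--             result+=i
--         c +=1
--
--     return result[::-1]
-- ===== SOURCE B (Python) =====
-- def solution(phone_number):
--     return '*' * (len(phone_number) - 4) + phone_number[-4:]
-- ===== Notes on version B (the rewrite author's own statement) =====
-- stated objective: simpler
-- what changed: Replaced the reversed character-by-character loop (with quadratic string concatenation) by a closed-form expression: an asterisk repeated len-4 times concatenated with the last-four-character slice.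
import Mathlib
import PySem

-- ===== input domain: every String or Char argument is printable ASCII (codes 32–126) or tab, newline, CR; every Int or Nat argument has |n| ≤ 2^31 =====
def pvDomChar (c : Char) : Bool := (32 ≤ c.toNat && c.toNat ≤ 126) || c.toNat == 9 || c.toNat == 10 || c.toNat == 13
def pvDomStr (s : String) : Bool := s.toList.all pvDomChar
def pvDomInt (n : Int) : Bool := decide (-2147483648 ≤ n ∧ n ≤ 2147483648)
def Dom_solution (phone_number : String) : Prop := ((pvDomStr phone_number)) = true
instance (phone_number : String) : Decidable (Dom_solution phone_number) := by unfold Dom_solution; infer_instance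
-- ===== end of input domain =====

-- ===== PORT A =====
-- B changes: the reversed accumulate-and-reverse loop of A is replaced by a closed-form
-- '*' * (len - 4) + phone_number[-4:] (objective: simpler). Return-value equivalence only.

-- the loop 'for i in phone_number[-1::-1]: ...' with counter c and accumulator result
def solutionLoop : List Char → List Char → Int → List Char
  | [], result, _ => result
  | i :: rest, result, c =>
      solutionLoop rest (result ++ [if c > 4 then '*' else i]) (c + 1)

def solution (phone_number : String) : String :=
  String.ofList (solutionLoop phone_number.toList.reverse [] 1).reverse

-- ===== PORT B =====
def solution_alt (phone_number : String) : String :=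
  String.ofList (List.replicate ((PySem.Str.len phone_number) - 4).toNat '*'
    ++ PySem.List.slice phone_number.toList (some (-4)) none)

-- ===== PRECONDITION & SPEC =====
def Spec_solution (phone_number : String) (out : String) : Prop := out = solution_alt phone_number
instance (phone_number : String) (out : String) : Decidable (Spec_solution phone_number out) := by unfold Spec_solution; infer_instance

-- ===== CLAIM (what is proved, stated in full; the proofs are below) =====
def Claim_equal_solution : Prop := ∀ (phone_number : String), Dom_solution phone_number → Spec_solution phone_number (solution phone_number)

-- ===== LEMMAS AND PROOFS =====

theorem solutionLoop_spec (l : List Char) : ∀ (res : List Char) (c : Int),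
    solutionLoop l res c
      = res ++ l.take (5 - c).toNat ++ List.replicate (l.length - (5 - c).toNat) '*' := by
  induction l with
  | nil => intro res c; simp [solutionLoop]
  | cons i rest ih =>
    intro res c
    by_cases hc : c > 4
    · have h5 : (5 - c).toNat = 0 := by omega
      have h5' : (5 - (c + 1)).toNat = 0 := by omega
      simp [solutionLoop, hc, ih, h5, h5', List.replicate_succ]
    · have h5 : (5 - c).toNat = (5 - (c + 1)).toNat + 1 := by omega
      simp [solutionLoop, hc, ih, h5, List.take_succ_cons]

-- ===== VERDICT (by name: the statement is the Claim_ definition above) =====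
theorem solution_spec : Claim_equal_solution := by
  intro s _
  unfold Spec_solution solution solution_alt
  set l := s.toList with hl
  rw [solutionLoop_spec]
  rw [PySem.List.slice_from_neg_ofNat l 4 (by omega)]
  have hlen : ((PySem.Str.len s) - 4).toNat = l.length - 4 := by
    simp [PySem.Str.len_eq, hl]; omega
  rw [hlen]
  have h4 : ((5 : Int) - 1).toNat = 4 := by decide
  simp only [h4, List.nil_append, List.reverse_append, List.reverse_replicate,
    List.length_reverse, List.take_reverse, List.reverse_reverse]
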